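-- pv_equiv track=rewrite | github.com/toannhuynh206/march-prediction | src/math_primitives.py | get_regional_winner_seed
-- ===== SOURCE A (Python) =====
-- R64_MATCHUPS = [
--     (1, 16), (8, 9), (5, 12), (4, 13),
--     (6, 11), (3, 14), (7, 10), (2, 15),
-- ]
--
-- PARENT_GAMES = {
--     8: (0, 1),
--     9: (2, 3),
--     10: (4, 5),
--     11: (6, 7),
--     12: (8, 9),
--     13: (10, 11),
--     14: (12, 13),
-- }
--
-- def get_game_bit(regional_int: int, game_idx: int) -> int:
--     """Get the outcome bit for a specific game within a regional bracket.
--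
--     Returns 0 (favorite wins) or 1 (upset).
--     """
--     return (regional_int >> game_idx) & 1
--
-- def get_regional_winner_seed(regional_int: int) -> int:
--     """Determine which seed wins a region given a 15-bit regional bracket.
--
--     Traces the bracket tree from R64 through E8 to find the champion's seed.
--     """
--     # Start with R64 seeds
--     game_winners = {}
--
--     # R64: determine winners of first 8 games
--     for g in range(8):
--         high_seed, low_seed = R64_MATCHUPS[g]
--         bit = get_game_bit(regional_int, g)
--         game_winners[g] = low_seed if bit == 1 else high_seed
--
--     # R32 through E8: trace winners through the bracket
--     for g in [8, 9, 10, 11, 12, 13, 14]: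
--         parent_a, parent_b = PARENT_GAMES[g]
--         seed_a = game_winners[parent_a]
--         seed_b = game_winners[parent_b]
--         # Bit determines which parent's winner advances
--         # bit=0: "higher seed" (lower number) wins; bit=1: "lower seed" wins
--         bit = get_game_bit(regional_int, g)
--         if bit == 0:
--             game_winners[g] = min(seed_a, seed_b)
--         else:
--             game_winners[g] = max(seed_a, seed_b)
--
--     return game_winners[14]
-- ===== SOURCE B (Python) =====
-- R64_MATCHUPS = [
--     (1, 16), (8, 9), (5, 12), (4, 13),
--     (6, 11), (3, 14), (7, 10), (2, 15),
-- ]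
--
-- PARENT_GAMES = {
--     8: (0, 1),
--     9: (2, 3),
--     10: (4, 5),
--     11: (6, 7),
--     12: (8, 9),
--     13: (10, 11),
--     14: (12, 13),
-- }
--
-- def get_regional_winner_seed(regional_int: int) -> int:
--     """Champion seed of a 15-bit regional bracket, by top-down tree recursion."""
--     def winner(g: int) -> int:
--         bit = (regional_int >> g) & 1
--         if g < 8:
--             high_seed, low_seed = R64_MATCHUPS[g]
--             return low_seed if bit == 1 else high_seed
--         parent_a, parent_b = PARENT_GAMES[g]
--         seed_a = winner(parent_a)
--         seed_b = winner(parent_b)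
--         return max(seed_a, seed_b) if bit == 1 else min(seed_a, seed_b)
--     return winner(14)
-- ===== Notes on version B (the rewrite author's own statement) =====
-- stated objective: alternative
-- what changed: Replaces the two bottom-up loops filling a game_winners dict with a single top-down recursive tree traversal winner(g) starting from the root game 14, so no table is built.
import Mathlib
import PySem

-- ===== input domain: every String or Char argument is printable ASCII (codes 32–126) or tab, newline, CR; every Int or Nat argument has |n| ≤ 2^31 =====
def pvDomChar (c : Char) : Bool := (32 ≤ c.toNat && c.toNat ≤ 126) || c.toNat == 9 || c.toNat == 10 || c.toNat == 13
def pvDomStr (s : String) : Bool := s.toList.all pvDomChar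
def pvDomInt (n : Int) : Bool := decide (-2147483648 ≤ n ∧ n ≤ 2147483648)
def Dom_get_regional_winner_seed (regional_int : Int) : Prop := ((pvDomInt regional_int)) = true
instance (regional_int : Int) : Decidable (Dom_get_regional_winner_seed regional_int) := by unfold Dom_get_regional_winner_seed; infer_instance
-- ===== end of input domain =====

-- B replaces A's two bottom-up table-filling loops by a top-down recursive
-- traversal of the bracket tree from the root game 14 (objective: alternative).

-- ===== PORT A =====
def pvR64_MATCHUPS : List (Int × Int) :=
  [(1, 16), (8, 9), (5, 12), (4, 13), (6, 11), (3, 14), (7, 10), (2, 15)]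

def pvPARENT_GAMES : PySem.Dict Nat (Nat × Nat) :=
  PySem.Dict.ofList ([(8, (0, 1)), (9, (2, 3)), (10, (4, 5)), (11, (6, 7)),
    (12, (8, 9)), (13, (10, 11)), (14, (12, 13))] : List (Nat × (Nat × Nat)))

-- (regional_int >> game_idx) & 1 ; all game indices used are the literal Nats 0..14
def get_game_bit (regional_int : Int) (game_idx : Nat) : Int :=
  PySem.Int.band (regional_int >>> game_idx) 1

def get_regional_winner_seed (regional_int : Int) : Int :=
  -- R64: determine winners of first 8 games
  let game_winners : PySem.Dict Nat Int :=
    (List.range 8).foldl (fun d g =>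
      let m := (PySem.List.pyGet? pvR64_MATCHUPS (Int.ofNat g)).getD (0, 0)
      let high_seed := m.1
      let low_seed := m.2
      let bit := get_game_bit regional_int g
      PySem.Dict.insert d g (if bit == 1 then low_seed else high_seed)) PySem.Dict.empty
  -- R32 through E8: trace winners through the bracket
  let game_winners :=
    [8, 9, 10, 11, 12, 13, 14].foldl (fun d g =>
      let p := (PySem.Dict.get? pvPARENT_GAMES g).getD (0, 0)
      let seed_a := (PySem.Dict.get? d p.1).getD 0
      let seed_b := (PySem.Dict.get? d p.2).getD 0
      let bit := get_game_bit regional_int g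
      PySem.Dict.insert d g (if bit == 0 then min seed_a seed_b else max seed_a seed_b)) game_winners
  (PySem.Dict.get? game_winners 14).getD 0

-- ===== PORT B =====
-- recursive winner(g), top-down from the root; the fuel argument only bounds the
-- recursion depth for termination (parents are smaller games, called with fuel 15 ≥ depth)
def pvWinner (regional_int : Int) : Nat → Nat → Int
  | 0, _ => 0
  | fuel + 1, g =>
    let bit := get_game_bit regional_int g
    if g < 8 then
      let m := (PySem.List.pyGet? pvR64_MATCHUPS (Int.ofNat g)).getD (0, 0)
      if bit == 1 then m.2 else m.1
    else
      let p := (PySem.Dict.get? pvPARENT_GAMES g).getD (0, 0)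
      let seed_a := pvWinner regional_int fuel p.1
      let seed_b := pvWinner regional_int fuel p.2
      if bit == 1 then max seed_a seed_b else min seed_a seed_b

def get_regional_winner_seed_alt (regional_int : Int) : Int :=
  pvWinner regional_int 15 14

-- ===== PRECONDITION & SPEC =====
def Spec_get_regional_winner_seed (regional_int : Int) (out : Int) : Prop := out = get_regional_winner_seed_alt regional_int
instance (regional_int : Int) (out : Int) : Decidable (Spec_get_regional_winner_seed regional_int out) := by unfold Spec_get_regional_winner_seed; infer_instance

-- ===== CLAIM (what is proved, stated in full; the proofs are below) =====
def Claim_equal_get_regional_winner_seed : Prop := ∀ (regional_int : Int), Dom_get_regional_winner_seed regional_int → Spec_get_regional_winner_seed regional_int (get_regional_winner_seed regional_int)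

-- ===== LEMMAS AND PROOFS =====

lemma pvBit01 (n : Int) (g : Nat) : get_game_bit n g = 0 ∨ get_game_bit n g = 1 := by
  unfold get_game_bit
  rw [PySem.Int.band_one, PySem.Int.mod_eq_emod_of_pos (by norm_num)]
  exact Int.emod_two_eq_zero_or_one _

-- A chooses with 'if bit == 0 then min … else max …', B with 'if bit == 1 then max … else min …';
-- they agree because the bit is 0 or 1
lemma pvSwapIf (n : Int) (g : Nat) (x y : Int) :
    (if get_game_bit n g == 0 then min x y else max x y)
      = (if get_game_bit n g == 1 then max x y else min x y) := by
  rcases pvBit01 n g with h | h <;> simp [h]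

-- named winner values of the 15 games, in A's shape (pvV…) and in B's shape (pvL/pvU…)
def pvL (n : Int) (g : Nat) : Int :=
  if get_game_bit n g == 1 then ((PySem.List.pyGet? pvR64_MATCHUPS (Int.ofNat g)).getD (0, 0)).2
  else ((PySem.List.pyGet? pvR64_MATCHUPS (Int.ofNat g)).getD (0, 0)).1
def pvV8 (n : Int) : Int := if get_game_bit n 8 == 0 then min (pvL n 0) (pvL n 1) else max (pvL n 0) (pvL n 1)
def pvV9 (n : Int) : Int := if get_game_bit n 9 == 0 then min (pvL n 2) (pvL n 3) else max (pvL n 2) (pvL n 3)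
def pvV10 (n : Int) : Int := if get_game_bit n 10 == 0 then min (pvL n 4) (pvL n 5) else max (pvL n 4) (pvL n 5)
def pvV11 (n : Int) : Int := if get_game_bit n 11 == 0 then min (pvL n 6) (pvL n 7) else max (pvL n 6) (pvL n 7)
def pvV12 (n : Int) : Int := if get_game_bit n 12 == 0 then min (pvV8 n) (pvV9 n) else max (pvV8 n) (pvV9 n)
def pvV13 (n : Int) : Int := if get_game_bit n 13 == 0 then min (pvV10 n) (pvV11 n) else max (pvV10 n) (pvV11 n)
def pvV14 (n : Int) : Int := if get_game_bit n 14 == 0 then min (pvV12 n) (pvV13 n) else max (pvV12 n) (pvV13 n)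
def pvU8 (n : Int) : Int := if get_game_bit n 8 == 1 then max (pvL n 0) (pvL n 1) else min (pvL n 0) (pvL n 1)
def pvU9 (n : Int) : Int := if get_game_bit n 9 == 1 then max (pvL n 2) (pvL n 3) else min (pvL n 2) (pvL n 3)
def pvU10 (n : Int) : Int := if get_game_bit n 10 == 1 then max (pvL n 4) (pvL n 5) else min (pvL n 4) (pvL n 5)
def pvU11 (n : Int) : Int := if get_game_bit n 11 == 1 then max (pvL n 6) (pvL n 7) else min (pvL n 6) (pvL n 7)
def pvU12 (n : Int) : Int := if get_game_bit n 12 == 1 then max (pvU8 n) (pvU9 n) else min (pvU8 n) (pvU9 n)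
def pvU13 (n : Int) : Int := if get_game_bit n 13 == 1 then max (pvU10 n) (pvU11 n) else min (pvU10 n) (pvU11 n)
def pvU14 (n : Int) : Int := if get_game_bit n 14 == 1 then max (pvU12 n) (pvU13 n) else min (pvU12 n) (pvU13 n)

def pvLeafDict (n : Int) : PySem.Dict Nat Int :=
  PySem.Dict.mk [(0, pvL n 0), (1, pvL n 1), (2, pvL n 2), (3, pvL n 3),
    (4, pvL n 4), (5, pvL n 5), (6, pvL n 6), (7, pvL n 7)]

def pvFullDict (n : Int) : PySem.Dict Nat Int :=
  PySem.Dict.mk [(0, pvL n 0), (1, pvL n 1), (2, pvL n 2), (3, pvL n 3),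
    (4, pvL n 4), (5, pvL n 5), (6, pvL n 6), (7, pvL n 7), (8, pvV8 n), (9, pvV9 n),
    (10, pvV10 n), (11, pvV11 n), (12, pvV12 n), (13, pvV13 n), (14, pvV14 n)]

set_option maxHeartbeats 800000 in
lemma pvFold1 (n : Int) :
    ((List.range 8).foldl (fun d g =>
      let m := (PySem.List.pyGet? pvR64_MATCHUPS (Int.ofNat g)).getD (0, 0)
      let high_seed := m.1
      let low_seed := m.2
      let bit := get_game_bit n g
      PySem.Dict.insert d g (if bit == 1 then low_seed else high_seed)) PySem.Dict.empty
      : PySem.Dict Nat Int) = pvLeafDict n := rfl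

set_option maxHeartbeats 1600000 in
lemma pvFold2 (n : Int) :
    ([8, 9, 10, 11, 12, 13, 14].foldl (fun d g =>
      let p := (PySem.Dict.get? pvPARENT_GAMES g).getD (0, 0)
      let seed_a := (PySem.Dict.get? d p.1).getD 0
      let seed_b := (PySem.Dict.get? d p.2).getD 0
      let bit := get_game_bit n g
      PySem.Dict.insert d g (if bit == 0 then min seed_a seed_b else max seed_a seed_b))
      (pvLeafDict n) : PySem.Dict Nat Int) = pvFullDict n := rfl

lemma pvA_eq (n : Int) : get_regional_winner_seed n = pvV14 n := by
  have h1 : get_regional_winner_seed n =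
      (PySem.Dict.get? ([8, 9, 10, 11, 12, 13, 14].foldl (fun d g =>
        let p := (PySem.Dict.get? pvPARENT_GAMES g).getD (0, 0)
        let seed_a := (PySem.Dict.get? d p.1).getD 0
        let seed_b := (PySem.Dict.get? d p.2).getD 0
        let bit := get_game_bit n g
        PySem.Dict.insert d g (if bit == 0 then min seed_a seed_b else max seed_a seed_b))
        ((List.range 8).foldl (fun d g =>
          let m := (PySem.List.pyGet? pvR64_MATCHUPS (Int.ofNat g)).getD (0, 0)
          let high_seed := m.1
          let low_seed := m.2
          let bit := get_game_bit n g
          PySem.Dict.insert d g (if bit == 1 then low_seed else high_seed)) PySem.Dict.empty))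
        14).getD 0 := rfl
  rw [h1, pvFold1, pvFold2]
  rfl

lemma pvB_eq (n : Int) : get_regional_winner_seed_alt n = pvU14 n := rfl

lemma pvVU (n : Int) : pvV14 n = pvU14 n := by
  simp only [pvV14, pvV13, pvV12, pvV11, pvV10, pvV9, pvV8,
    pvU14, pvU13, pvU12, pvU11, pvU10, pvU9, pvU8, pvSwapIf]

-- ===== VERDICT (by name: the statement is the Claim_ definition above) =====
theorem get_regional_winner_seed_spec : Claim_equal_get_regional_winner_seed := by
  intro n _
  unfold Spec_get_regional_winner_seed
  rw [pvA_eq, pvB_eq, pvVU]
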